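-- pv_equiv track=rewrite | github.com/devarajuvinoda/2021-A2-04-04-00-10-42-20-1-17817 | demo_eval.py | normalize_test
-- ===== SOURCE A (Python) =====
-- def normalize_test(tokenized_program, name_dict):
--     cnt = 0
--     itr = -1
--     build_dict = {}
--     reverse_dict = {}
--     for i,j in zip(tokenized_program, name_dict):
--         itr += 1
--         new_name = ('var_'+str(cnt))
--         if((j == 'name' or j == 'number' or j== 'string') and (i in build_dict.keys())):
--             tokenized_program[itr] = build_dict[i]
--         elif(j == 'name' or j == 'number' or j== 'string'):
--             tokenized_program[itr] = new_name
--             cnt += 1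
--             build_dict[i] = new_name
--             reverse_dict[new_name] = i
--
--     return tokenized_program, reverse_dict
-- ===== SOURCE B (Python) =====
-- def normalize_test(tokenized_program, name_dict):
--     # stage 1: collect the positions/tokens that need renaming, in order
--     hits = [(idx, tok) for idx, (tok, typ) in enumerate(zip(tokenized_program, name_dict))
--             if typ in ('name', 'number', 'string')]
--     # stage 2: canonical numbering = first-occurrence order of the distinct hit tokens
--     order = list(dict.fromkeys(tok for _, tok in hits))
--     names = {tok: 'var_' + str(k) for k, tok in enumerate(order)}
--     # stage 3: rewrite the recorded positions
--     for idx, tok in hits: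
--         tokenized_program[idx] = names[tok]
--     return tokenized_program, {'var_' + str(k): tok for k, tok in enumerate(order)}
-- ===== Notes on version B (the rewrite author's own statement) =====
-- stated objective: alternative
-- what changed: Replaces A's single pass with interleaved dict updates by three staged passes: collect (index, token) hits, number the distinct tokens once via dict.fromkeys first-occurrence dedup, then rewrite the recorded positions from the derived name table; the reverse dict is built directly from the dedup list, not maintained in the loop.
import Mathlib
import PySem

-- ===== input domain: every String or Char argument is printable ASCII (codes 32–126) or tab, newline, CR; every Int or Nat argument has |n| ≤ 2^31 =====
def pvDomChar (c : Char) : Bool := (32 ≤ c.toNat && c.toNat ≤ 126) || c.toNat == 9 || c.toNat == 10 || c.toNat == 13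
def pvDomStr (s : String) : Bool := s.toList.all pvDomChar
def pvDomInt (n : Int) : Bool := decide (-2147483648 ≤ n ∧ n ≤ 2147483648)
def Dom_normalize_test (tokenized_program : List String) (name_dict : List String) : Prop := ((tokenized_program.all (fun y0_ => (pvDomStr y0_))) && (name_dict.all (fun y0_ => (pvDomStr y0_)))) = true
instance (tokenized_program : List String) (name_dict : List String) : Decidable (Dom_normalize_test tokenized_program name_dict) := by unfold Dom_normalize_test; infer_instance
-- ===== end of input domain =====

-- B replaces A's single pass (interleaved dict/reverse-dict updates) by three staged passes:
-- collect hits, dedup-number the distinct tokens, then rewrite; objective: alternative decomposition.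
-- Python A mutates tokenized_program in place (B performs the same mutation); the equivalence
-- proved here is about the return value.


-- ===== PORT A =====
-- loop body of A; state = (cnt, itr, build_dict, reverse_dict, tokenized_program)
def normAstep (st : Int × Int × PySem.Dict String String × PySem.Dict String String × List String)
    (ij : String × String) : Int × Int × PySem.Dict String String × PySem.Dict String String × List String :=
  match st, ij with
  | (cnt, itr, build, rev, tok), (i, j) =>
    let itr' := itr + 1
    let new_name := "var_" ++ PySem.Int.toStr cnt
    if (j == "name" || j == "number" || j == "string") && build.contains i then
      -- tokenized_program[itr] = build_dict[i]; key present by the guard, itr is the in-range zip index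
      (cnt, itr', build, rev, PySem.List.pySetD tok itr' ((build.get? i).getD ""))
    else if j == "name" || j == "number" || j == "string" then
      (cnt + 1, itr', build.insert i new_name, rev.insert new_name i, PySem.List.pySetD tok itr' new_name)
    else
      (cnt, itr', build, rev, tok)

def normalize_test (tokenized_program : List String) (name_dict : List String) : List String × (List (String × String)) :=
  let st := (tokenized_program.zip name_dict).foldl normAstep
      (0, -1, PySem.Dict.empty, PySem.Dict.empty, tokenized_program)
  (st.2.2.2.2, st.2.2.2.1.items)

-- ===== PORT B =====
-- hits = [(idx, tok) for idx, (tok, typ) in enumerate(zip(tokenized_program, name_dict)) if typ in (...)]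
def normBhits (tokenized_program : List String) (name_dict : List String) : List (Int × String) :=
  ((PySem.List.enumerate (tokenized_program.zip name_dict) 0).filter
      (fun p => p.2.2 == "name" || p.2.2 == "number" || p.2.2 == "string")).map
    (fun p => (p.1, p.2.1))

def normalize_test_alt (tokenized_program : List String) (name_dict : List String) : List String × (List (String × String)) :=
  let hits := normBhits tokenized_program name_dict
  -- order = list(dict.fromkeys(tok for _, tok in hits))
  let order := PySem.List.dedup (hits.map (·.2))
  -- names = {tok: 'var_' + str(k) for k, tok in enumerate(order)}
  let names := (PySem.List.enumerate order 0).foldl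
      (fun d p => d.insert p.2 ("var_" ++ PySem.Int.toStr p.1)) PySem.Dict.empty
  -- for idx, tok in hits: tokenized_program[idx] = names[tok]  (key always present: tok ∈ order)
  let tok := hits.foldl
      (fun tk p => PySem.List.pySetD tk p.1 ((names.get? p.2).getD "")) tokenized_program
  let rev := (PySem.List.enumerate order 0).foldl
      (fun d p => d.insert ("var_" ++ PySem.Int.toStr p.1) p.2) PySem.Dict.empty
  (tok, rev.items)

-- ===== PRECONDITION & SPEC =====
def Spec_normalize_test (tokenized_program : List String) (name_dict : List String) (out : List String × (List (String × String))) : Prop := out = normalize_test_alt tokenized_program name_dict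
instance (tokenized_program : List String) (name_dict : List String) (out : List String × (List (String × String))) : Decidable (Spec_normalize_test tokenized_program name_dict out) := by unfold Spec_normalize_test; infer_instance

-- ===== CLAIM (what is proved, stated in full; the proofs are below) =====
def Claim_equal_normalize_test : Prop := ∀ (tokenized_program : List String) (name_dict : List String), Dom_normalize_test tokenized_program name_dict → Spec_normalize_test tokenized_program name_dict (normalize_test tokenized_program name_dict)

-- ===== LEMMAS AND PROOFS =====

-- the tagged guard
def tagged (j : String) : Bool := j == "name" || j == "number" || j == "string"

-- tokens of the tagged pairs of l, in order
def toksOf (l : List (String × String)) : List String :=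
  (l.filter (fun p => tagged p.2)).map (·.1)

-- (index, token) pairs of the tagged pairs, indices from s  (= B's hits for s = 0)
def hitsOf (l : List (String × String)) (s : Int) : List (Int × String) :=
  ((PySem.List.enumerate l s).filter (fun p => tagged p.2.2)).map (fun p => (p.1, p.2.1))

-- forward name table of a numbering list (= B's names)
def fwd (o : List String) : PySem.Dict String String :=
  (PySem.List.enumerate o 0).foldl
    (fun d p => d.insert p.2 ("var_" ++ PySem.Int.toStr p.1)) PySem.Dict.empty

-- reverse table of a numbering list (= B's rev)
def revD (o : List String) : PySem.Dict String String :=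
  (PySem.List.enumerate o 0).foldl
    (fun d p => d.insert ("var_" ++ PySem.Int.toStr p.1) p.2) PySem.Dict.empty

theorem hitsOf_cons (p : String × String) (l : List (String × String)) (s : Int) :
    hitsOf (p :: l) s =
      (if tagged p.2 then [(s, p.1)] else []) ++ hitsOf l (s + 1) := by
  simp only [hitsOf, PySem.List.enumerate_cons, List.filter_cons]
  split_ifs <;> simp

theorem toksOf_cons (p : String × String) (l : List (String × String)) :
    toksOf (p :: l) = (if tagged p.2 then [p.1] else []) ++ toksOf l := by
  simp only [toksOf, List.filter_cons]
  split_ifs <;> simp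

theorem map_snd_hitsOf (l : List (String × String)) (s : Int) :
    (hitsOf l s).map (·.2) = toksOf l := by
  induction l generalizing s with
  | nil => rfl
  | cons p t ih => rw [hitsOf_cons, toksOf_cons]; split_ifs <;> simp [ih]

theorem fwd_append (o : List String) (t : String) :
    fwd (o ++ [t]) = (fwd o).insert t ("var_" ++ PySem.Int.toStr (o.length : Int)) := by
  simp [fwd, PySem.List.enumerate_append, List.foldl_append, PySem.List.enumerate]

theorem revD_append (o : List String) (t : String) :
    revD (o ++ [t]) = (revD o).insert ("var_" ++ PySem.Int.toStr (o.length : Int)) t := by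
  simp [revD, PySem.List.enumerate_append, List.foldl_append, PySem.List.enumerate]

theorem fwd_contains (o : List String) (t : String) :
    (fwd o).contains t = decide (t ∈ o) := by
  induction o using List.reverseRecOn with
  | nil => simp [fwd, PySem.List.enumerate]
  | append_singleton o u ih =>
    rw [fwd_append, PySem.Dict.contains_insert, ih]
    by_cases h : t = u <;> simp [h, List.mem_append]

-- extending the numbering list with fresh tokens does not change existing entries
theorem fwd_get?_ext (ts : List String) (o : List String) (t : String) (h : t ∈ o) :
    (fwd (ts.foldl PySem.Set.add o)).get? t = (fwd o).get? t := by
  induction ts generalizing o with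
  | nil => rfl
  | cons u rest ih =>
    simp only [List.foldl_cons]
    by_cases hu : PySem.Set.contains o u = true
    · rw [PySem.Set.add, if_pos hu]; exact ih o h
    · rw [PySem.Set.add, if_neg hu]
      have hne : t ≠ u := by
        intro he; subst he
        exact hu (by simpa [PySem.Set.contains] using h)
      rw [ih (o ++ [u]) (by simp [h]), fwd_append,
        PySem.Dict.get?_insert_of_ne _ _ hne]

-- the value of a token already numbered, read from the FINAL table, is its current entry
theorem fwd_get?_final (ts : List String) (o : List String) (t : String) (h : t ∈ o) :
    ((fwd (ts.foldl PySem.Set.add o)).get? t).getD "" = ((fwd o).get? t).getD "" := by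
  rw [fwd_get?_ext ts o t h]

-- main loop correspondence: A's fold from a state described by a numbering list o
theorem loop_eq (l : List (String × String)) :
    ∀ (o : List String) (tok : List String) (idx : Nat),
    l.foldl normAstep (((o.length : Int)), (idx : Int) - 1, fwd o, revD o, tok)
      = ((((toksOf l).foldl PySem.Set.add o).length : Int),
         (idx : Int) + l.length - 1,
         fwd ((toksOf l).foldl PySem.Set.add o),
         revD ((toksOf l).foldl PySem.Set.add o),
         (hitsOf l idx).foldl
           (fun tk p => PySem.List.pySetD tk p.1
             (((fwd ((toksOf l).foldl PySem.Set.add o)).get? p.2).getD "")) tok) := by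
  induction l with
  | nil => intro o tok idx; simp [toksOf, hitsOf, PySem.List.enumerate]
  | cons hd tl ih =>
    intro o tok idx
    obtain ⟨i, j⟩ := hd
    rw [toksOf_cons, hitsOf_cons]
    simp only [List.foldl_cons]
    have harith : (idx : Int) - 1 + 1 = (idx : Int) := by ring
    by_cases hg : tagged j = true
    · simp only [if_pos hg, List.foldl_cons, List.singleton_append]
      by_cases hc : i ∈ o
      · -- token already numbered: A writes its current entry, Set.add is the identity
        have hstep : normAstep (((o.length : Int)), (idx : Int) - 1, fwd o, revD o, tok) (i, j)
            = (((o.length : Int)), (idx : Int), fwd o, revD o,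
               PySem.List.pySetD tok (idx : Int) (((fwd o).get? i).getD "")) := by
          simp only [normAstep, harith]
          rw [if_pos (by simp [fwd_contains, hc]; simpa [tagged] using hg)]
        have hadd : PySem.Set.add o i = o := by
          rw [PySem.Set.add, if_pos (by simpa [PySem.Set.contains] using hc)]
        rw [hstep, hadd]
        have h1 : ((idx : Int)) = ((idx + 1 : Nat) : Int) - 1 := by push_cast; ring
        rw [h1, ih o _ (idx + 1)]
        rw [fwd_get?_final (toksOf tl) o i hc]
        simp only [List.length_cons, Prod.mk.injEq, true_and]
        exact ⟨by push_cast; ring, by norm_num⟩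
      · -- fresh token: A numbers it with var_|o|, the table extends by one entry
        have hcontains : (fwd o).contains i = false := by
          simp [fwd_contains, hc]
        have hstep : normAstep (((o.length : Int)), (idx : Int) - 1, fwd o, revD o, tok) (i, j)
            = (((o.length : Int)) + 1, (idx : Int),
               fwd (o ++ [i]), revD (o ++ [i]),
               PySem.List.pySetD tok (idx : Int)
                 ("var_" ++ PySem.Int.toStr ((o.length : Int)))) := by
          simp only [normAstep, harith]
          rw [if_neg (by simp [hcontains]), if_pos (by simpa [tagged] using hg),
            fwd_append, revD_append]
        have hadd : PySem.Set.add o i = o ++ [i] := by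
          rw [PySem.Set.add, if_neg (by simpa [PySem.Set.contains] using hc)]
        rw [hstep, hadd]
        have h1 : ((idx : Int)) = ((idx + 1 : Nat) : Int) - 1 := by push_cast; ring
        have h2 : ((o.length : Int)) + 1 = (((o ++ [i]).length : Nat) : Int) := by
          simp
        rw [h1, h2, ih (o ++ [i]) _ (idx + 1)]
        have hval : ((fwd ((toksOf tl).foldl PySem.Set.add (o ++ [i]))).get? i).getD ""
            = "var_" ++ PySem.Int.toStr ((o.length : Int)) := by
          rw [fwd_get?_final (toksOf tl) (o ++ [i]) i (by simp), fwd_append,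
            PySem.Dict.get?_insert_self]
          rfl
        rw [hval]
        simp only [List.length_cons, Prod.mk.injEq, true_and]
        exact ⟨by push_cast; ring, by norm_num⟩
    · -- untagged pair: A only advances itr
      have hstep : normAstep (((o.length : Int)), (idx : Int) - 1, fwd o, revD o, tok) (i, j)
          = (((o.length : Int)), (idx : Int), fwd o, revD o, tok) := by
        simp only [normAstep, harith]
        rw [if_neg (by simp [tagged] at hg; simp [hg]), if_neg (by simpa [tagged] using hg)]
      rw [hstep]
      simp only [if_neg hg, List.nil_append]
      have h1 : ((idx : Int)) = ((idx + 1 : Nat) : Int) - 1 := by push_cast; ring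
      rw [h1, ih o tok (idx + 1)]
      simp only [List.length_cons, Prod.mk.injEq, true_and]
      exact ⟨by push_cast; ring, by norm_num⟩

-- ===== VERDICT (by name: the statement is the Claim_ definition above) =====
theorem normalize_test_spec : Claim_equal_normalize_test := by
  intro tokenized_program name_dict _hdom
  unfold Spec_normalize_test normalize_test normalize_test_alt
  have h := loop_eq (tokenized_program.zip name_dict) [] tokenized_program 0
  have hord : (toksOf (tokenized_program.zip name_dict)).foldl PySem.Set.add []
      = PySem.List.dedup ((normBhits tokenized_program name_dict).map (·.2)) := by
    rw [show normBhits tokenized_program name_dict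
        = hitsOf (tokenized_program.zip name_dict) 0 from rfl,
      map_snd_hitsOf, PySem.List.dedup_eq_ofList, PySem.Set.ofList_eq_foldl]
  simp only [List.length_nil, Nat.cast_zero] at h
  norm_num at h
  rw [show fwd [] = PySem.Dict.empty from rfl, show revD [] = PySem.Dict.empty from rfl] at h
  rw [h]
  rw [hord]
  rfl
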